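-- pv_equiv track=rewrite | github.com/santule/indelmip | scripts/check_distribution.py | convert_to_edges
-- ===== SOURCE A (Python) =====
-- def next_pos(str1,curr_pos,seq_len,gap_char = '-'):
--     start_pos = curr_pos + 1
--
--     while(start_pos < len(str1)):
--         if str1[start_pos] != gap_char:
--             return start_pos
--         else:
--             start_pos = start_pos + 1
--     return seq_len
--
-- def convert_to_edges(seq_str,seq_pog_dict):
--     seq_len = len(seq_str)
--     ind = 0
--     while(ind < seq_len - 1):
--         if seq_str[ind] != '-':
--             curr_ind = ind
--             ind = next_pos(seq_str,curr_ind,seq_len - 1) # find the next filled position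
--             seq_pog_dict[curr_ind].add(ind)
--         else:
--             ind = ind + 1
--     return seq_pog_dict
-- ===== SOURCE B (Python) =====
-- def convert_to_edges(seq_str, seq_pog_dict):
--     n = len(seq_str)
--     filled = [i for i, c in enumerate(seq_str) if c != '-']
--     for p, q in zip(filled, filled[1:] + [n - 1]):
--         if p < n - 1:
--             seq_pog_dict[p].add(q)
--     return seq_pog_dict
-- ===== Notes on version B (the rewrite author's own statement) =====
-- stated objective: simpler
-- what changed: Replaces A's while loop that scans ahead with next_pos to find each successor (and jumps the loop index there) by first collecting the list of non-gap indices once and then linking consecutive entries in a single pairwise pass, the last one capped at len-1.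
import Mathlib
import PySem

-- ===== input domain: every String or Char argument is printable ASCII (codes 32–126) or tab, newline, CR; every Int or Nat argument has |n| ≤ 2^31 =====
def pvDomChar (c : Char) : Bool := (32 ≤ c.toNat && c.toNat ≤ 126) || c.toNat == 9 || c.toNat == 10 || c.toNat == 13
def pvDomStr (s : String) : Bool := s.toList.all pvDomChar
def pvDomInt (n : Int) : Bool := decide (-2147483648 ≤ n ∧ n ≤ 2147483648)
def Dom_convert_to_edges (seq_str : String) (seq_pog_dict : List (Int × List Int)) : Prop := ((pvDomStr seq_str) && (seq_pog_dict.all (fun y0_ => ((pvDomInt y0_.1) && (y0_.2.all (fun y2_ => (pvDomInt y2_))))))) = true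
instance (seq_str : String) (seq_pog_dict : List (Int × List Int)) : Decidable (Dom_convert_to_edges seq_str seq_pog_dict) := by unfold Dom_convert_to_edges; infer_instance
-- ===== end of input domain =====

-- B replaces A's scan-and-jump while loop by a precomputed list of non-gap indices and a
-- pairwise pass (objective: simpler). A mutates the sets inside seq_pog_dict in place; B performs
-- the same in-place mutation, and the equivalence proved here is about the returned dict.

-- ===== PORT A =====
-- the while loop inside next_pos (fuel-guarded structural recursion; fuel = len(str1)+1 always
-- suffices since start_pos increases by 1 per iteration)
def nextPosLoop (str1 : List Char) (seq_len : Int) : Nat → Int → Int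
  | 0, _ => seq_len
  | fuel + 1, start_pos =>
    if start_pos < (str1.length : Int) then
      if PySem.List.pyGetD str1 start_pos ' ' ≠ '-' then start_pos
      else nextPosLoop str1 seq_len fuel (start_pos + 1)
    else seq_len

def next_pos (str1 : List Char) (curr_pos : Int) (seq_len : Int) : Int :=
  nextPosLoop str1 seq_len (str1.length + 1) (curr_pos + 1)

-- the while loop of convert_to_edges (fuel-guarded; ind strictly increases each iteration,
-- so fuel = len(seq_str)+1 suffices)
def convLoop (s : List Char) (seq_len : Int) : Nat → Int → PySem.Dict Int (List Int) →
    PySem.Dict Int (List Int)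
  | 0, _, d => d
  | fuel + 1, ind, d =>
    if ind < seq_len - 1 then
      if PySem.List.pyGetD s ind ' ' ≠ '-' then
        convLoop s seq_len fuel (next_pos s ind (seq_len - 1))
          (d.modify ind [] (fun t => PySem.Set.add t (next_pos s ind (seq_len - 1))))
      else convLoop s seq_len fuel (ind + 1) d
    else d

def convert_to_edges (seq_str : String) (seq_pog_dict : List (Int × List Int)) :
    List (Int × List Int) :=
  let s := seq_str.toList
  (convLoop s (s.length : Int) (s.length + 1) 0 (PySem.Dict.mk seq_pog_dict)).items

-- ===== PORT B =====
-- one step of B's for loop over the (p, q) pairs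
def fillEdge (n : Int) (d : PySem.Dict Int (List Int)) (pq : Int × Int) :
    PySem.Dict Int (List Int) :=
  if pq.1 < n - 1 then d.modify pq.1 [] (fun t => PySem.Set.add t pq.2) else d

def convert_to_edges_alt (seq_str : String) (seq_pog_dict : List (Int × List Int)) :
    List (Int × List Int) :=
  let s := seq_str.toList
  let n : Int := (s.length : Int)
  let filled : List Int :=
    ((PySem.List.enumerate s 0).filter (fun pc => pc.2 ≠ '-')).map (fun pc => pc.1)
  ((filled.zip (filled.drop 1 ++ [n - 1])).foldl (fillEdge n)
    (PySem.Dict.mk seq_pog_dict)).items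

-- ===== PRECONDITION & SPEC =====
-- Pre_ excludes exactly the inputs on which Python's A (and B) raise KeyError:
-- some non-gap position strictly before the last character is not a key of seq_pog_dict.
def Pre_convert_to_edges (seq_str : String) (seq_pog_dict : List (Int × List Int)) : Prop :=
  ∀ i ∈ List.range seq_str.toList.length,
    i + 1 < seq_str.toList.length → seq_str.toList.getD i ' ' ≠ '-' →
      (i : Int) ∈ seq_pog_dict.map Prod.fst
instance (seq_str : String) (seq_pog_dict : List (Int × List Int)) :
    Decidable (Pre_convert_to_edges seq_str seq_pog_dict) := by
  unfold Pre_convert_to_edges; infer_instance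

def pvWitness_convert_to_edges : String × (List (Int × List Int)) := ("ab-c-", [(0, []), (1, []), (3, [])])

def Spec_convert_to_edges (seq_str : String) (seq_pog_dict : List (Int × List Int)) (out : List (Int × List Int)) : Prop := out = convert_to_edges_alt seq_str seq_pog_dict
instance (seq_str : String) (seq_pog_dict : List (Int × List Int)) (out : List (Int × List Int)) : Decidable (Spec_convert_to_edges seq_str seq_pog_dict out) := by unfold Spec_convert_to_edges; infer_instance

-- ===== CLAIM (what is proved, stated in full; the proofs are below) =====
def Claim_equal_convert_to_edges : Prop := ∀ (seq_str : String) (seq_pog_dict : List (Int × List Int)), Dom_convert_to_edges seq_str seq_pog_dict → Pre_convert_to_edges seq_str seq_pog_dict → Spec_convert_to_edges seq_str seq_pog_dict (convert_to_edges seq_str seq_pog_dict)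

-- ===== LEMMAS AND PROOFS =====

-- the list of non-gap indices of u, the first one being labelled i
def filledF : List Char → Int → List Int
  | [], _ => []
  | c :: t, i => if c ≠ '-' then i :: filledF t (i + 1) else filledF t (i + 1)

theorem filledF_eq_enumerate (t : List Char) (i : Int) :
    ((PySem.List.enumerate t i).filter (fun pc => pc.2 ≠ '-')).map (fun pc => pc.1) =
      filledF t i := by
  induction t generalizing i with
  | nil => simp [filledF, PySem.List.enumerate_nil]
  | cons c t ih =>
    rw [PySem.List.enumerate_cons, filledF]
    simp only [ne_eq, decide_not] at ih ⊢
    by_cases h : c = '-' <;> simp [h, ih]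

theorem nextPosLoop_eq_headD (s : List Char) (u : List Char) (j : Nat)
    (hu : s.drop j = u) (sl : Int) (fuel : Nat) (hf : u.length ≤ fuel) :
    nextPosLoop s sl fuel (j : Int) = (filledF u (j : Int)).headD sl := by
  induction u generalizing j fuel with
  | nil =>
    have hlen : s.length ≤ j := by
      by_contra h
      exact absurd hu (by simp [List.drop_eq_nil_iff]; omega)
    cases fuel with
    | zero => simp [nextPosLoop, filledF]
    | succ f => rw [nextPosLoop, if_neg (by omega)]; simp [filledF]
  | cons c t ih =>
    have hj : j < s.length := by
      by_contra h
      rw [List.drop_eq_nil_iff.mpr (by omega)] at hu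
      simp at hu
    have h2 := hu.symm.trans (List.drop_eq_getElem_cons hj)
    injection h2 with h3 h4
    have hc : s[j] = c := h3.symm
    have ht : s.drop (j + 1) = t := h4.symm
    have hget : PySem.List.pyGetD s (j : Int) ' ' = c := by
      simp [PySem.List.pyGetD_natCast, List.getD_eq_getElem?_getD, hj, hc]
    obtain ⟨f, rfl⟩ : ∃ f, fuel = f + 1 := by
      cases fuel with
      | zero => simp at hf
      | succ f => exact ⟨f, rfl⟩
    rw [nextPosLoop, if_pos (by omega), hget]
    by_cases h : c = '-'
    · rw [if_neg (by simp [h])]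
      have hcast : ((j : Int) + 1) = ((j + 1 : Nat) : Int) := by push_cast; ring
      rw [hcast, ih (j + 1) ht f (by simpa using hf)]
      conv_rhs => rw [filledF, if_neg (by simp [h]), hcast]
    · rw [if_pos (by simp [h])]
      simp [filledF, h]

theorem filledF_head (s : List Char) (u : List Char) (j : Nat) (hu : s.drop j = u)
    (q : Int) (rest : List Int) (h : filledF u (j : Int) = q :: rest) :
    ∃ m : Nat, q = (m : Int) ∧ j ≤ m ∧ filledF (s.drop m) (m : Int) = q :: rest := by
  induction u generalizing j with
  | nil => simp [filledF] at h
  | cons c t ih =>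
    have hj : j < s.length := by
      by_contra hh
      rw [List.drop_eq_nil_iff.mpr (by omega)] at hu
      simp at hu
    have h2 := hu.symm.trans (List.drop_eq_getElem_cons hj)
    injection h2 with h3 h4
    have ht : s.drop (j + 1) = t := h4.symm
    by_cases hc : c = '-'
    · rw [filledF, if_neg (by simp [hc])] at h
      have hcast : ((j : Int) + 1) = ((j + 1 : Nat) : Int) := by push_cast; ring
      rw [hcast] at h
      obtain ⟨m, hm1, hm2, hm3⟩ := ih (j + 1) ht h
      exact ⟨m, hm1, by omega, hm3⟩
    · rw [filledF, if_pos (by simp [hc])] at h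
      refine ⟨j, ?_, le_refl j, ?_⟩
      · exact ((List.cons.injEq _ _ _ _).mp h).1.symm
      · rw [hu, filledF, if_pos (by simp [hc])]
        exact h

-- once the loop index is past seq_len - 2 the loop body never runs, whatever the fuel
theorem convLoop_stop (s : List Char) (n : Int) (k : Nat) (i : Int)
    (d : PySem.Dict Int (List Int)) (h : ¬ i < n - 1) :
    convLoop s n k i d = d := by
  cases k with
  | zero => rfl
  | succ k => rw [convLoop, if_neg h]

theorem convLoop_eq_fold (s : List Char) (k : Nat) :
    ∀ (j : Nat) (d : PySem.Dict Int (List Int)), s.length - j ≤ k →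
    convLoop s (s.length : Int) k (j : Int) d =
      ((filledF (s.drop j) (j : Int)).zip
        ((filledF (s.drop j) (j : Int)).drop 1 ++ [(s.length : Int) - 1])).foldl
        (fillEdge (s.length : Int)) d := by
  induction k with
  | zero =>
    intro j d hk
    have hj : s.length ≤ j := by omega
    rw [List.drop_eq_nil_iff.mpr (by omega), convLoop]
    simp [filledF]
  | succ k ih =>
    intro j d hk
    by_cases hjlen' : s.length ≤ j
    · rw [List.drop_eq_nil_iff.mpr (by omega), convLoop, if_neg (by omega)]
      simp [filledF]
    · have hjlen : j < s.length := by omega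
      have hdrop := List.drop_eq_getElem_cons hjlen
      have hget : PySem.List.pyGetD s (j : Int) ' ' = s[j] := by
        simp [PySem.List.pyGetD_natCast, List.getD_eq_getElem?_getD, hjlen]
      by_cases hlast : (j : Int) < (s.length : Int) - 1
      · -- j is not the last position
        have hcast : ((j : Int) + 1) = ((j + 1 : Nat) : Int) := by push_cast; ring
        by_cases hc : s[j] = '-'
        · -- gap: step to j + 1
          rw [convLoop, if_pos hlast, if_neg (by simp [hget]; exact hc), hcast,
            ih (j + 1) d (by omega), hdrop, filledF, if_neg (by simp; exact hc), hcast]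
        · -- filled position
          rw [convLoop, if_pos hlast, if_pos (by simp [hget]; exact hc)]
          have hnp : next_pos s (j : Int) ((s.length : Int) - 1) =
              (filledF (s.drop (j + 1)) ((j + 1 : Nat) : Int)).headD ((s.length : Int) - 1) := by
            rw [next_pos, hcast]
            exact nextPosLoop_eq_headD s (s.drop (j + 1)) (j + 1) rfl _ _
              (by simpa using Nat.sub_le_succ_sub _ _ |>.trans (by omega))
          rw [hdrop, filledF, if_pos (by simp; exact hc), hcast]
          rcases hF : filledF (s.drop (j + 1)) ((j + 1 : Nat) : Int) with _ | ⟨q, rest⟩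
          · -- no later filled position: link to length - 1 and stop
            rw [hnp, hF]
            simp only [List.headD_nil]
            rw [convLoop_stop s _ k _ _ (by omega)]
            simp [fillEdge, hlast]
          · -- q is the next filled position
            obtain ⟨m, hm1, hm2, hm3⟩ := filledF_head s _ (j + 1) rfl q rest hF
            rw [hnp, hF]
            simp only [List.headD_cons]
            rw [hm1, ih m _ (by omega), hm3, ← hm1]
            simp [fillEdge, hlast]
      · -- j is the last position: loop exits immediately
        rw [convLoop, if_neg hlast, hdrop,
          List.drop_eq_nil_iff.mpr (by omega), filledF]
        by_cases hc : s[j] = '-' <;> simp [hc, filledF, fillEdge] <;> try omega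

-- ===== VERDICT (by name: the statement is the Claim_ definition above) =====
theorem convert_to_edges_spec : Claim_equal_convert_to_edges := by
  intro seq_str seq_pog_dict _hdom _hpre
  unfold Spec_convert_to_edges convert_to_edges convert_to_edges_alt
  have h := convLoop_eq_fold seq_str.toList (seq_str.toList.length + 1) 0
    (PySem.Dict.mk seq_pog_dict) (by omega)
  simp only [Nat.cast_zero, List.drop_zero] at h
  simp only [filledF_eq_enumerate]
  rw [h]
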